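-- pv_equiv track=rewrite | github.com/hyeoniiee/codingTest_all | 백준/Silver/3986. 좋은 단어/좋은 단어.py | is_good_word
-- ===== SOURCE A (Python) =====
-- def is_good_word(word):
--     stack = []
--     for char in word:
--         if stack and stack[-1] == char:
--             stack.pop()
--         else:
--             stack.append(char)
--     return not stack
-- ===== SOURCE B (Python) =====
-- def is_good_word(word):
--     w = list(word)
--     changed = True
--     while changed:
--         changed = False
--         out = []
--         i = 0
--         n = len(w)
--         while i < n:
--             if i + 1 < n and w[i] == w[i + 1]:
--                 i += 2
--                 changed = True
--             else:
--                 out.append(w[i])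
--                 i += 1
--         w = out
--     return not w
-- ===== Notes on version B (the rewrite author's own statement) =====
-- stated objective: alternative
-- what changed: Replaces the single-pass stack reduction with repeated full scans that delete adjacent equal pairs in place until a fixpoint, then tests emptiness.
import Mathlib
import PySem

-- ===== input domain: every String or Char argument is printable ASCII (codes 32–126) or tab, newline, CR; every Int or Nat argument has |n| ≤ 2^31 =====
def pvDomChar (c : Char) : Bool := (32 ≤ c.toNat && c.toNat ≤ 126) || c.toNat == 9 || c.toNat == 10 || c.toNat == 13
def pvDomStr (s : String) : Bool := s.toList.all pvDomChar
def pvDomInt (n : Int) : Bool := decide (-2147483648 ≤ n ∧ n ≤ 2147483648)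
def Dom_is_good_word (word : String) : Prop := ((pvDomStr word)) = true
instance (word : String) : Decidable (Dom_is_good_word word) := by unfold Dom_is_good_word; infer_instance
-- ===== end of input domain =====

-- B replaces A's single stack pass by repeated whole-list scans deleting adjacent equal pairs until a fixpoint (alternative decomposition, same results).

-- ===== PORT A =====
-- the stack is represented head-first: Python's append/pop/stack[-1] at the end become cons/tail/head
def pvStep (stack : List Char) (char : Char) : List Char :=
  if (match stack with | x :: _ => x == char | [] => false) then stack.tail
  else char :: stack

def is_good_word (word : String) : Bool :=
  (word.toList.foldl pvStep []).isEmpty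

-- ===== PORT B =====
-- one left-to-right scan of the inner while-loop: deletes adjacent equal pairs, reports whether any deletion happened
def pvScan : List Char → List Char × Bool
  | [] => ([], false)
  | [c] => ([c], false)
  | a :: b :: t =>
      if a == b then ((pvScan t).1, true)
      else (a :: (pvScan (b :: t)).1, (pvScan (b :: t)).2)

theorem pvScan_len (w : List Char) :
    (pvScan w).1.length + (if (pvScan w).2 then 2 else 0) ≤ w.length := by
  fun_induction pvScan w with
  | case1 => simp
  | case2 c => simp
  | case3 a b t h ih =>
      simp only [pvScan, if_pos h]
      split at ih <;> simp_all <;> omega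
  | case4 a b t h ih =>
      simp only [pvScan, if_neg h]
      split at ih <;> split <;> simp_all <;> omega

-- the outer while-changed loop
def pvFix (w : List Char) : List Char :=
  if h : (pvScan w).2 then pvFix (pvScan w).1 else (pvScan w).1
termination_by w.length
decreasing_by
  have := pvScan_len w
  rw [if_pos h] at this
  omega

def is_good_word_alt (word : String) : Bool :=
  (pvFix word.toList).isEmpty

-- ===== PRECONDITION & SPEC =====
def Spec_is_good_word (word : String) (out : Bool) : Prop := out = is_good_word_alt word
instance (word : String) (out : Bool) : Decidable (Spec_is_good_word word out) := by unfold Spec_is_good_word; infer_instance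

-- ===== CLAIM (what is proved, stated in full; the proofs are below) =====
def Claim_equal_is_good_word : Prop := ∀ (word : String), Dom_is_good_word word → Spec_is_good_word word (is_good_word word)

-- ===== LEMMAS AND PROOFS =====

-- "reduced": no two adjacent equal characters
def pvRed : List Char → Prop
  | [] => True
  | [_] => True
  | a :: b :: t => a ≠ b ∧ pvRed (b :: t)

theorem pvRed_step {s : List Char} (hs : pvRed s) (c : Char) : pvRed (pvStep s c) := by
  cases s with
  | nil => simp only [pvStep]; exact trivial
  | cons x t =>
      by_cases h : x = c
      · subst h
        simp only [pvStep, BEq.rfl, if_pos, List.tail_cons]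
        cases t with
        | nil => trivial
        | cons y u => exact hs.2
      · have hb : (x == c) = false := by simp [h]
        simp only [pvStep, hb, Bool.false_eq_true, if_neg, not_false_iff]
        exact ⟨fun hc => h hc.symm, hs⟩

theorem pvStep_step {s : List Char} (hs : pvRed s) (c : Char) :
    pvStep (pvStep s c) c = s := by
  cases s with
  | nil => simp [pvStep]
  | cons x t =>
      by_cases h : x = c
      · subst h
        have hx : pvStep (x :: t) x = t := by simp [pvStep]
        rw [hx]
        cases t with
        | nil => simp [pvStep]
        | cons y u =>
            have hy : y ≠ x := fun e => hs.1 e.symm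
            have hyb : (y == x) = false := by simp [hy]
            simp [pvStep, hyb]
      · have hb : (x == c) = false := by simp [h]
        simp [pvStep, hb]

-- one scan does not change the stack-fold value (from a reduced stack)
theorem pvScan_foldl (w : List Char) :
    ∀ s : List Char, pvRed s → (pvScan w).1.foldl pvStep s = w.foldl pvStep s := by
  induction w using pvScan.induct with
  | case1 => intro s _; rfl
  | case2 c => intro s _; rfl
  | case3 a b t h ih =>
      intro s hs
      have hab : a = b := by simpa using h
      subst hab
      simp only [pvScan, if_pos h, List.foldl]
      rw [ih s hs, pvStep_step hs]
  | case4 a b t h ih =>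
      intro s hs
      simp only [pvScan, if_neg h, List.foldl]
      exact ih (pvStep s a) (pvRed_step hs a)

-- if the scan found no pair, the word is unchanged and already reduced
theorem pvScan_stable (w : List Char) (h : (pvScan w).2 = false) :
    (pvScan w).1 = w ∧ pvRed w := by
  fun_induction pvScan w with
  | case1 => exact ⟨rfl, trivial⟩
  | case2 c => exact ⟨rfl, trivial⟩
  | case3 a b t hab ih => simp at h
  | case4 a b t hab ih =>
      obtain ⟨h1, h2⟩ := ih h
      exact ⟨by simp [h1], ⟨by simpa using hab, h2⟩⟩

theorem pvFix_foldl (w : List Char) :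
    ∀ s : List Char, pvRed s → (pvFix w).foldl pvStep s = w.foldl pvStep s := by
  induction w using pvFix.induct with
  | case1 w hp ih =>
      intro s hs
      rw [pvFix, dif_pos hp, ih s hs]
      exact pvScan_foldl w s hs
  | case2 w hp =>
      intro s hs
      rw [pvFix, dif_neg hp, (pvScan_stable w (by simpa using hp)).1]

theorem pvFix_red (w : List Char) : pvRed (pvFix w) := by
  induction w using pvFix.induct with
  | case1 w hp ih => rw [pvFix, dif_pos hp]; exact ih
  | case2 w hp =>
      rw [pvFix, dif_neg hp, (pvScan_stable w (by simpa using hp)).1]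
      exact (pvScan_stable w (by simpa using hp)).2

-- folding a fully-reduced word from a compatible reduced stack just reverses it
theorem pvFold_red (s r : List Char) (h : pvRed (r.reverse ++ s)) :
    s.foldl pvStep r = s.reverse ++ r := by
  induction s generalizing r with
  | nil => simp
  | cons c t ih =>
      have hstep : pvStep r c = c :: r := by
        cases r with
        | nil => simp [pvStep]
        | cons x u =>
            have hx : x ≠ c := by
              have h' : pvRed ((x :: u).reverse ++ c :: t) := h
              have : ∀ v : List Char, pvRed (v ++ [x] ++ c :: t) → x ≠ c := by
                intro v
                induction v with
                | nil => exact fun hv => hv.1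
                | cons z zs ihv =>
                    intro hv
                    cases zs with
                    | nil => exact ihv hv.2
                    | cons _ _ => exact ihv hv.2
              exact this u.reverse (by simpa using h')
            simp [pvStep, hx]
      rw [List.foldl_cons, hstep, ih (c :: r) (by simpa using h)]
      simp

theorem pvFold_red_nil (s : List Char) (h : pvRed s) :
    s.foldl pvStep [] = s.reverse := by
  simpa using pvFold_red s [] (by simpa using h)

-- ===== VERDICT (by name: the statement is the Claim_ definition above) =====
theorem is_good_word_spec : Claim_equal_is_good_word := by
  intro word _
  unfold Spec_is_good_word is_good_word is_good_word_alt
  have hred : pvRed ([] : List Char) := trivial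
  rw [← pvFix_foldl word.toList [] hred,
      pvFold_red_nil _ (pvFix_red word.toList)]
  simp
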